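-- pv_equiv track=rewrite | github.com/nodirsafarov/adenum | adenum_lib/parsers.py | extract_kerberoast_hashes
-- ===== SOURCE A (Python) =====
-- def extract_kerberoast_hashes(text: str) -> list[str]:
--     out: list[str] = []
--     buf: list[str] = []
--     for line in text.splitlines():
--         if line.startswith("$krb5tgs$"):
--             if buf:
--                 out.append("".join(buf))
--             buf = [line]
--         elif buf and line.strip() and not line.startswith("["):
--             buf.append(line.strip())
--         else:
--             if buf:
--                 out.append("".join(buf))
--                 buf = []
--     if buf:
--         out.append("".join(buf))
--     return [hash_str for hash_str in out if hash_str.startswith("$krb5tgs$")]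
-- ===== SOURCE B (Python) =====
-- def extract_kerberoast_hashes(text: str) -> list[str]:
--     lines = text.splitlines()
--     n = len(lines)
--     hashes: list[str] = []
--     for i in range(n):
--         if lines[i].startswith("$krb5tgs$"):
--             pieces = [lines[i]]
--             j = i + 1
--             while j < n:
--                 nxt = lines[j]
--                 if nxt.startswith("$krb5tgs$") or not nxt.strip() or nxt.startswith("["):
--                     break
--                 pieces.append(nxt.strip())
--                 j += 1
--             hashes.append("".join(pieces))
--     return hashes
-- ===== Notes on version B (the rewrite author's own statement) =====
-- stated objective: alternative
-- what changed: Replaced A's single-pass buffer+flush state machine (and its trailing filter) by a header-driven decomposition: find each kerberoast header line and gather its stripped continuation lines in an inner scan, emitting each joined group directly with no buffer state and no final filter.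
import Mathlib
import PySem

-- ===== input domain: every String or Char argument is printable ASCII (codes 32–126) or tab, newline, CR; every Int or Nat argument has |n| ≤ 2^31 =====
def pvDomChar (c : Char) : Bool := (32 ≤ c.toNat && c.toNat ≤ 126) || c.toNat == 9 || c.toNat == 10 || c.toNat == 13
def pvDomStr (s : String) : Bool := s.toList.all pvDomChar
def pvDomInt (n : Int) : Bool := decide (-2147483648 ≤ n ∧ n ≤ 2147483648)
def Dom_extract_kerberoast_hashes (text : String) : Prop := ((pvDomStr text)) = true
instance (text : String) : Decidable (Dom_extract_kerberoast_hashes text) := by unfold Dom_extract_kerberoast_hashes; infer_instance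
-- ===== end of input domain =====

-- B replaces A's buffer+flush state machine by a per-header gather pass (alternative decomposition, same cost class).

-- ===== PORT A =====
-- one step of A's for-loop: state = (out, buf)
def pvStepA (st : List String × List String) (line : String) : List String × List String :=
  if PySem.Str.startswith line "$krb5tgs$" = true then
    ((if st.2 = [] then st.1 else st.1 ++ [PySem.Str.join "" st.2]), [line])
  else if st.2 ≠ [] ∧ PySem.Str.strip line ≠ "" ∧ ¬ PySem.Str.startswith line "[" = true then
    (st.1, st.2 ++ [PySem.Str.strip line])
  else if st.2 = [] then st else (st.1 ++ [PySem.Str.join "" st.2], [])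

def extract_kerberoast_hashes (text : String) : List String :=
  let st := (PySem.Str.splitlines text).foldl pvStepA ([], [])
  let out := if st.2 = [] then st.1 else st.1 ++ [PySem.Str.join "" st.2]
  out.filter (fun h => PySem.Str.startswith h "$krb5tgs$")

-- ===== PORT B =====
-- inner while-loop of B: collect stripped continuation lines until a stop line
def pvGather : List String → List String
  | [] => []
  | l :: ls =>
    if PySem.Str.startswith l "$krb5tgs$" = true ∨ PySem.Str.strip l = "" ∨ PySem.Str.startswith l "[" = true then []
    else PySem.Str.strip l :: pvGather ls

-- outer loop of B over the line list: at each header, emit the joined group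
def pvScanB : List String → List String
  | [] => []
  | l :: ls =>
    if PySem.Str.startswith l "$krb5tgs$" = true
    then PySem.Str.join "" (l :: pvGather ls) :: pvScanB ls
    else pvScanB ls

def extract_kerberoast_hashes_alt (text : String) : List String :=
  pvScanB (PySem.Str.splitlines text)

-- ===== PRECONDITION & SPEC =====
def Spec_extract_kerberoast_hashes (text : String) (out : List String) : Prop := out = extract_kerberoast_hashes_alt text
instance (text : String) (out : List String) : Decidable (Spec_extract_kerberoast_hashes text out) := by unfold Spec_extract_kerberoast_hashes; infer_instance

-- ===== CLAIM (what is proved, stated in full; the proofs are below) =====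
def Claim_equal_extract_kerberoast_hashes : Prop := ∀ (text : String), Dom_extract_kerberoast_hashes text → Spec_extract_kerberoast_hashes text (extract_kerberoast_hashes text)

-- ===== LEMMAS AND PROOFS =====

-- final flush of A's loop state
def pvFinalize (st : List String × List String) : List String :=
  if st.2 = [] then st.1 else st.1 ++ [PySem.Str.join "" st.2]

-- what the rest of A's run contributes, given the current buffer
def pvRest (buf : List String) (ls : List String) : List String :=
  match buf with
  | [] => pvScanB ls
  | h :: t => PySem.Str.join "" (h :: (t ++ pvGather ls)) :: pvScanB ls

-- invariant: the buffer is empty or starts with a header line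
def pvInv (buf : List String) : Prop :=
  buf = [] ∨ ∃ h t, buf = h :: t ∧ PySem.Str.startswith h "$krb5tgs$" = true

lemma pvKey : ∀ (ls : List String) (out buf : List String), pvInv buf →
    pvFinalize (ls.foldl pvStepA (out, buf)) = out ++ pvRest buf ls := by
  intro ls
  induction ls with
  | nil =>
    intro out buf hinv
    rcases hinv with h | ⟨h, t, rfl, hh⟩
    · subst h; simp [pvFinalize, pvRest, pvScanB]
    · simp [pvFinalize, pvRest, pvScanB, pvGather]
  | cons l ls ih =>
    intro out buf hinv
    simp only [List.foldl_cons]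
    by_cases hhd : PySem.Chars.startswith l.toList ['$', 'k', 'r', 'b', '5', 't', 'g', 's', '$'] = true
    · -- header line: flush (if nonempty) and start new buffer [l]
      have hh' : PySem.Str.startswith l "$krb5tgs$" = true := by
        simpa using hhd
      rcases hinv with h | ⟨h, t, rfl, hh⟩
      · subst h
        rw [show pvStepA (out, []) l = (out, [l]) by simp [pvStepA, hhd]]
        rw [ih _ _ (Or.inr ⟨l, [], rfl, hh'⟩)]
        simp [pvRest, pvScanB, hhd]
      · rw [show pvStepA (out, h :: t) l = (out ++ [PySem.Str.join "" (h :: t)], [l]) by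
          simp [pvStepA, hhd]]
        rw [ih _ _ (Or.inr ⟨l, [], rfl, hh'⟩)]
        simp [pvRest, pvScanB, pvGather, hhd]
    · rcases hinv with h | ⟨h, t, rfl, hh⟩
      · -- empty buffer, non-header line: state unchanged
        subst h
        rw [show pvStepA (out, []) l = (out, []) by simp [pvStepA, hhd]]
        rw [ih _ _ (Or.inl rfl)]
        simp [pvRest, pvScanB, hhd]
      · by_cases hok : PySem.Str.strip l ≠ "" ∧ PySem.Chars.startswith l.toList ['['] = false
        · -- continuation line: append its strip to the buffer
          rw [show pvStepA (out, h :: t) l = (out, (h :: t) ++ [PySem.Str.strip l]) by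
            simp [pvStepA, hhd, hok.1, hok.2]]
          rw [ih _ _ (Or.inr ⟨h, t ++ [PySem.Str.strip l], by simp, hh⟩)]
          simp [pvRest, pvScanB, pvGather, hhd, hok.1, hok.2]
        · -- stop line: flush the buffer
          have hstop : PySem.Str.strip l = "" ∨ PySem.Chars.startswith l.toList ['['] = true := by
            rcases Classical.em (PySem.Str.strip l = "") with hs | hs
            · exact Or.inl hs
            · refine Or.inr ?_
              rcases Bool.eq_false_or_eq_true (PySem.Chars.startswith l.toList ['[']) with hb | hb
              · exact hb
              · exact absurd ⟨hs, hb⟩ hok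
          rw [show pvStepA (out, h :: t) l = (out ++ [PySem.Str.join "" (h :: t)], []) by
            rcases hstop with hs | hs <;> simp [pvStepA, hhd, hs]]
          rw [ih _ _ (Or.inl rfl)]
          rcases hstop with hs | hs <;>
            simp [pvRest, pvScanB, pvGather, hhd, hs]

-- a joined group headed by a header line starts with "$krb5tgs$"
lemma pvJoinHeader (l : String) (r : List String)
    (h : PySem.Str.startswith l "$krb5tgs$" = true) :
    PySem.Str.startswith (PySem.Str.join "" (l :: r)) "$krb5tgs$" = true := by
  simp only [PySem.Str.startswith_eq, PySem.Str.toList_join] at *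
  rw [PySem.Chars.startswith_iff] at *
  simp only [List.map_cons]
  refine h.trans ?_
  rw [show ("".toList : List Char) = [] from rfl]
  cases r with
  | nil => simp [PySem.Chars.join, List.intercalate]
  | cons b t =>
    simp only [List.map_cons]
    rw [PySem.Chars.join_cons_cons]
    simp

lemma pvScanB_header : ∀ (ls : List String), ∀ x ∈ pvScanB ls,
    PySem.Str.startswith x "$krb5tgs$" = true := by
  intro ls
  induction ls with
  | nil => simp [pvScanB]
  | cons l ls ih =>
    intro x hx
    simp only [pvScanB] at hx
    by_cases hhd : PySem.Str.startswith l "$krb5tgs$" = true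
    · rw [if_pos hhd, List.mem_cons] at hx
      rcases hx with hx | hx
      · exact hx ▸ pvJoinHeader l _ hhd
      · exact ih x hx
    · rw [if_neg hhd] at hx; exact ih x hx

-- ===== VERDICT (by name: the statement is the Claim_ definition above) =====
theorem extract_kerberoast_hashes_spec : Claim_equal_extract_kerberoast_hashes := by
  intro text _
  unfold Spec_extract_kerberoast_hashes extract_kerberoast_hashes extract_kerberoast_hashes_alt
  have h := pvKey (PySem.Str.splitlines text) [] [] (Or.inl rfl)
  simp only [pvRest, List.nil_append] at h
  show List.filter _ (pvFinalize _) = _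
  rw [h]
  refine List.filter_eq_self.mpr ?_
  intro x hx
  simpa using pvScanB_header (PySem.Str.splitlines text) x hx
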